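-- pv_equiv track=rewrite | github.com/Namtk214/SCAM-BERT | src/preprocessing.py | neutralize_speakers
-- ===== SOURCE A (Python) =====
-- from typing import Dict, List, Tuple
--
-- def neutralize_speakers(messages: List[Dict]) -> List[Dict]:
--     """
--     Đổi speaker_role thành Speaker_A, Speaker_B, ... theo thứ tự xuất hiện.
--     Tránh rò rỉ nhãn qua tên role (scammer/victim).
--     """
--     role_map = {}
--     counter = 0
--     neutralized = []
--     for msg in messages:
--         role = msg["speaker_role"]
--         if role not in role_map:
--             role_map[role] = f"Speaker_{chr(65 + counter)}"  # A, B, C, ...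
--             counter += 1
--         new_msg = dict(msg)
--         new_msg["speaker_neutral"] = role_map[role]
--         neutralized.append(new_msg)
--     return neutralized
-- ===== SOURCE B (Python) =====
-- from typing import Dict, List
--
-- def neutralize_speakers(messages: List[Dict]) -> List[Dict]:
--     roles = [m["speaker_role"] for m in messages]
--
--     def label(role):
--         # the letter index of a role = how many distinct roles occur before its first occurrence
--         return "Speaker_" + chr(65 + len(set(roles[:roles.index(role)])))
--
--     return [{**m, "speaker_neutral": label(m["speaker_role"])} for m in messages]
-- ===== Notes on version B (the rewrite author's own statement) =====
-- stated objective: alternative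
-- what changed: Removes A's incremental role_map/counter state entirely: each message's label is computed independently as 65 + the count of distinct roles occurring before the first occurrence of its role (set(roles[:roles.index(role)])), trading A's single stateful pass for stateless per-message computation.
import Mathlib
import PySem

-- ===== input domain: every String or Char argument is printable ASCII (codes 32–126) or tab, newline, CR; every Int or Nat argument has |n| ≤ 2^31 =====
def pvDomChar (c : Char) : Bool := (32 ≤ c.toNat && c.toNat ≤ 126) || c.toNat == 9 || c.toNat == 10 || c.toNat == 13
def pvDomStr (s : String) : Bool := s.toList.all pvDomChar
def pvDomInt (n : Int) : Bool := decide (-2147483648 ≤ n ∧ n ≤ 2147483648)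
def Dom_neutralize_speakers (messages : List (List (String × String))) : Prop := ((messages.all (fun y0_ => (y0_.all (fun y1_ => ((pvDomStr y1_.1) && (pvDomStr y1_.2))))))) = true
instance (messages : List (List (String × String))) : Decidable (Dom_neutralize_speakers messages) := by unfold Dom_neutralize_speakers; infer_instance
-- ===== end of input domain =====

-- B drops A's incremental role_map/counter state entirely: each message's label is computed
-- independently as the number of distinct roles before its role's first occurrence (objective: alternative).


-- ===== PORT A =====
def neutralize_speakers (messages : List (List (String × String))) : List (List (String × String)) :=
  (messages.foldl
    (fun (st : PySem.Dict String String × Nat × List (List (String × String))) msg =>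
      let role := (PySem.Dict.ofList msg).getD "speaker_role" ""
      let rc : PySem.Dict String String × Nat :=
        if st.1.contains role then (st.1, st.2.1)
        else (st.1.insert role ("Speaker_" ++ String.mk [Char.ofNat (65 + st.2.1)]), st.2.1 + 1)
      let new_msg := (PySem.Dict.ofList msg).insert "speaker_neutral" (rc.1.getD role "")
      (rc.1, rc.2, st.2.2 ++ [new_msg.items]))
    (PySem.Dict.empty, 0, [])).2.2

-- ===== PORT B =====
-- label(role): roles.index(role) is exact here — at every call site role ∈ roles (it is the
-- role of one of the messages), so index? is some and the .getD 0 default is never taken.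
def pvLabelB (roles : List String) (role : String) : String :=
  "Speaker_" ++ String.mk [Char.ofNat (65 +
    PySem.Set.len (PySem.Set.ofList
      (PySem.List.slice roles none (some (((PySem.List.index? roles role).getD 0 : Nat) : Int))))).toNat]

def neutralize_speakers_alt (messages : List (List (String × String))) : List (List (String × String)) :=
  let roles := messages.map (fun m => (PySem.Dict.ofList m).getD "speaker_role" "")
  messages.map (fun m =>
    ((PySem.Dict.ofList m).insert "speaker_neutral"
      (pvLabelB roles ((PySem.Dict.ofList m).getD "speaker_role" ""))).items)

-- ===== PRECONDITION & SPEC =====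
-- Pre_ excludes exactly the messages missing the "speaker_role" key, on which the Python A raises KeyError (B raises too).
def Pre_neutralize_speakers (messages : List (List (String × String))) : Prop :=
  (messages.all (fun msg => msg.any (fun p => p.1 == "speaker_role"))) = true
instance (messages : List (List (String × String))) : Decidable (Pre_neutralize_speakers messages) := by unfold Pre_neutralize_speakers; infer_instance
def pvWitness_neutralize_speakers : (List (List (String × String))) :=
  ([[("speaker_role", "scammer"), ("text", "hi")], [("speaker_role", "victim")], [("speaker_role", "scammer")]])
def Spec_neutralize_speakers (messages : List (List (String × String))) (out : List (List (String × String))) : Prop := out = neutralize_speakers_alt messages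
instance (messages : List (List (String × String))) (out : List (List (String × String))) : Decidable (Spec_neutralize_speakers messages out) := by unfold Spec_neutralize_speakers; infer_instance

-- ===== CLAIM (what is proved, stated in full; the proofs are below) =====
def Claim_equal_neutralize_speakers : Prop := ∀ (messages : List (List (String × String))), Dom_neutralize_speakers messages → Pre_neutralize_speakers messages → Spec_neutralize_speakers messages (neutralize_speakers messages)

-- ===== LEMMAS AND PROOFS =====

-- the role of a message, and the label for the n-th distinct role
def pvRole (m : List (String × String)) : String := (PySem.Dict.ofList m).getD "speaker_role" ""
def pvLabel (n : Nat) : String := "Speaker_" ++ String.mk [Char.ofNat (65 + n)]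
-- A's role_map after the first-appearance list is `seen` (labels offset by o)
def pvMap (seen : List String) (o : Nat) : PySem.Dict String String :=
  PySem.Dict.mk (seen.zipIdx.map (fun p => (p.1, pvLabel (o + p.2))))
-- the output row for message m once the full first-appearance list is `u`
def pvRow (u : List String) (m : List (String × String)) : List (String × String) :=
  ((PySem.Dict.ofList m).insert "speaker_neutral" (pvLabel (u.idxOf (pvRole m)))).items

theorem pvMap_cons (x : String) (seen : List String) (o : Nat) :
    pvMap (x :: seen) o = PySem.Dict.mk ((x, pvLabel o) :: (pvMap seen (o+1)).items) := by
  simp only [pvMap, List.zipIdx_cons, List.zipIdx_succ, List.map_cons, List.map_map,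
    Function.comp_def, Nat.add_zero]
  congr 2
  apply List.map_congr_left
  rintro ⟨a, i⟩ _
  show (a, pvLabel (o + (i + 1))) = (a, pvLabel (o + 1 + i))
  rw [show o + (i + 1) = o + 1 + i from by omega]

theorem pvMap_contains (seen : List String) (o : Nat) (r : String) :
    (pvMap seen o).contains r = decide (r ∈ seen) := by
  induction seen generalizing o with
  | nil => simp [pvMap, PySem.Dict.contains_mk]
  | cons x t ih =>
    rw [pvMap_cons, PySem.Dict.contains_mk]
    simp only [List.any_cons]
    rw [← PySem.Dict.contains_mk, show PySem.Dict.mk (pvMap t (o+1)).items = pvMap t (o+1) from rfl,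
      ih]
    by_cases h : x = r
    · simp [h]
    · have h2 : ¬ r = x := fun hh => h hh.symm
      simp [h, h2]

theorem pvMap_getD (seen : List String) (o : Nat) (r : String) (h : r ∈ seen) :
    (pvMap seen o).getD r "" = pvLabel (o + seen.idxOf r) := by
  induction seen generalizing o with
  | nil => simp at h
  | cons x t ih =>
    rw [pvMap_cons, PySem.Dict.getD, PySem.Dict.get?_mk_cons]
    by_cases hx : x = r
    · simp [hx]
    · have hr : r ∈ t := by cases h with | head => exact absurd rfl hx | tail _ h => exact h
      simp only [beq_iff_eq, hx, if_false]
      rw [show PySem.Dict.mk (pvMap t (o+1)).items = pvMap t (o+1) from rfl]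
      rw [← PySem.Dict.getD, ih (o+1) hr, List.idxOf_cons_ne _ (by exact hx)]
      congr 1
      omega

theorem pvMap_insert (seen : List String) (r : String) (h : r ∉ seen) :
    (pvMap seen 0).insert r (pvLabel seen.length) = pvMap (seen ++ [r]) 0 := by
  apply PySem.Dict.ext
  rw [PySem.Dict.items_insert_of_not_contains _ _ (by rw [pvMap_contains]; simpa using h)]
  simp only [pvMap, List.zipIdx_append, List.map_append, List.zipIdx_cons, List.zipIdx_nil,
    List.map_cons, List.map_nil, Nat.zero_add]

theorem update_append (seen : List String) (l : List String) :
    ∃ t, PySem.Set.update seen l = seen ++ t := by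
  induction l generalizing seen with
  | nil => exact ⟨[], by simp [PySem.Set.update]⟩
  | cons x l ih =>
    have hstep : PySem.Set.update seen (x :: l) = PySem.Set.update (PySem.Set.add seen x) l := by
      simp [PySem.Set.update]
    by_cases hx : PySem.Set.contains seen x
    · obtain ⟨t, ht⟩ := ih seen
      exact ⟨t, by rw [hstep, PySem.Set.add, if_pos hx, ht]⟩
    · obtain ⟨t, ht⟩ := ih (seen ++ [x])
      refine ⟨[x] ++ t, ?_⟩
      rw [hstep, PySem.Set.add, if_neg hx, ht, List.append_assoc]

theorem idxOf_update (seen : List String) (l : List String) (r : String) (h : r ∈ seen) :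
    (PySem.Set.update seen l).idxOf r = seen.idxOf r := by
  obtain ⟨t, ht⟩ := update_append seen l
  rw [ht, List.idxOf_append, if_pos h]

theorem loopA (rest : List (List (String × String))) (seen : List String)
    (acc : List (List (String × String))) (hnd : seen.Nodup) :
    (rest.foldl
      (fun (st : PySem.Dict String String × Nat × List (List (String × String))) msg =>
        let role := (PySem.Dict.ofList msg).getD "speaker_role" ""
        let rc : PySem.Dict String String × Nat :=
          if st.1.contains role then (st.1, st.2.1)
          else (st.1.insert role ("Speaker_" ++ String.mk [Char.ofNat (65 + st.2.1)]), st.2.1 + 1)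
        let new_msg := (PySem.Dict.ofList msg).insert "speaker_neutral" (rc.1.getD role "")
        (rc.1, rc.2, st.2.2 ++ [new_msg.items]))
      (pvMap seen 0, seen.length, acc)).2.2
    = acc ++ rest.map (pvRow (PySem.Set.update seen (rest.map pvRole))) := by
  induction rest generalizing seen acc with
  | nil => simp [PySem.Set.update]
  | cons m rest ih =>
    simp only [List.foldl_cons, List.map_cons]
    rw [show (PySem.Dict.ofList m).getD "speaker_role" "" = pvRole m from rfl]
    rw [pvMap_contains]
    have hupd : ∀ s : List String, PySem.Set.update s (pvRole m :: rest.map pvRole)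
        = PySem.Set.update (PySem.Set.add s (pvRole m)) (rest.map pvRole) := by
      intro s; simp [PySem.Set.update]
    by_cases hm : pvRole m ∈ seen
    · simp only [hm, decide_true, if_true]
      rw [pvMap_getD seen 0 _ hm, Nat.zero_add]
      rw [ih seen _ hnd, hupd, PySem.Set.add, if_pos (by simpa using hm)]
      rw [List.append_assoc, List.singleton_append]
      congr 2
      simp only [pvRow]
      rw [idxOf_update _ _ _ hm]
    · simp only [hm, decide_false, Bool.false_eq_true, if_false]
      rw [show ("Speaker_" ++ String.mk [Char.ofNat (65 + seen.length)]) = pvLabel seen.length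
        from rfl]
      rw [pvMap_insert seen _ hm]
      have hmem : pvRole m ∈ seen ++ [pvRole m] := by simp
      rw [pvMap_getD _ 0 _ hmem, Nat.zero_add]
      have hnd' : (seen ++ [pvRole m]).Nodup := by
        rw [List.nodup_append]
        refine ⟨hnd, List.nodup_singleton _, ?_⟩
        intro a ha b hb
        rw [List.mem_singleton] at hb
        subst hb
        exact fun h2 => hm (h2 ▸ ha)
      rw [show seen.length + 1 = (seen ++ [pvRole m]).length from by simp]
      rw [ih (seen ++ [pvRole m]) _ hnd']
      rw [hupd, PySem.Set.add, if_neg (by simpa using hm)]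
      rw [List.append_assoc, List.singleton_append]
      congr 2
      simp only [pvRow]
      rw [idxOf_update _ _ _ hmem, List.idxOf_append, if_neg hm]

-- key bridge: the position of r in set(l) equals the number of distinct elements before
-- the first occurrence of r in l
theorem idxOf_ofList_eq_len_take (l s : List String) (r : String)
    (h : r ∈ l) (hs : r ∉ s) :
    (PySem.Set.update s l).idxOf r = (PySem.Set.update s (l.take (l.idxOf r))).length := by
  induction l generalizing s with
  | nil => simp at h
  | cons x t ih =>
    have hstep : ∀ (s : List String) (t : List String),
        PySem.Set.update s (x :: t) = PySem.Set.update (PySem.Set.add s x) t := by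
      intro s t; simp [PySem.Set.update]
    by_cases hx : x = r
    · subst hx
      rw [List.idxOf_cons_self, List.take_zero]
      rw [hstep, PySem.Set.add, if_neg (by simpa using hs)]
      obtain ⟨tt, htt⟩ := update_append (s ++ [x]) t
      rw [htt, List.append_assoc, List.idxOf_append, if_neg hs, List.singleton_append,
        List.idxOf_cons_self]
      simp [PySem.Set.update]
    · have hr : r ∈ t := by cases h with | head => exact absurd rfl hx | tail _ h => exact h
      rw [List.idxOf_cons_ne _ (by exact hx), List.take_succ_cons, hstep, hstep]
      refine ih (PySem.Set.add s x) hr ?_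
      rw [PySem.Set.add]
      split
      · exact hs
      · intro hmem
        rcases List.mem_append.mp hmem with h1 | h2
        · exact hs h1
        · exact hx (List.mem_singleton.mp h2).symm

theorem index?_of_mem (l : List String) (r : String) (h : r ∈ l) :
    PySem.List.index? l r = some (l.idxOf r) := by
  induction l with
  | nil => simp at h
  | cons x t ih =>
    by_cases hx : x = r
    · subst hx
      rw [PySem.List.index?_cons_self, List.idxOf_cons_self]
    · have hr : r ∈ t := by cases h with | head => exact absurd rfl hx | tail _ h => exact h
      rw [PySem.List.index?_cons_of_ne _ (by exact hx), ih hr,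
        List.idxOf_cons_ne _ (by exact hx)]
      rfl

-- B's per-message label equals A's label at the position of the role in the first-appearance list
theorem labelB_eq (roles : List String) (r : String) (h : r ∈ roles) :
    pvLabelB roles r = pvLabel ((PySem.Set.update ([] : List String) roles).idxOf r) := by
  unfold pvLabelB
  rw [index?_of_mem _ _ h, Option.getD_some, PySem.List.slice_to_natCast]
  rw [idxOf_ofList_eq_len_take _ [] _ h (List.not_mem_nil)]
  rw [show PySem.Set.len (PySem.Set.ofList (roles.take (roles.idxOf r)))
      = ((PySem.Set.update [] (roles.take (roles.idxOf r))).length : Int) from rfl]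
  rw [show (65 + ((PySem.Set.update ([] : List String) (roles.take (roles.idxOf r))).length : Int)).toNat
      = 65 + (PySem.Set.update ([] : List String) (roles.take (roles.idxOf r))).length from by omega]
  rfl

-- ===== VERDICT (by name: the statement is the Claim_ definition above) =====
theorem neutralize_speakers_spec : Claim_equal_neutralize_speakers := by
  intro messages _ _
  show neutralize_speakers messages = neutralize_speakers_alt messages
  refine Eq.trans (loopA messages [] [] List.nodup_nil) ?_
  rw [List.nil_append]
  show _ = messages.map (fun m =>
    ((PySem.Dict.ofList m).insert "speaker_neutral"
      (pvLabelB (messages.map pvRole) (pvRole m))).items)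
  apply List.map_congr_left
  intro m hmem
  rw [labelB_eq _ _ (List.mem_map_of_mem hmem)]
  rfl
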